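-- pv_equiv track=rewrite | github.com/tomoriolu/IA02_project | dodo.py | create_grid
-- ===== SOURCE A (Python) =====
-- Grid = list[list[int]]
--
-- def create_grid(n: int = 7) -> Grid:
--     "fonction qui initialise une grille au format hexagonale"
--     grid: list = []
--     for i in range(2 * n - 1):
--         line: list[int] = []
--         for j in range(2 * n - 1):
--             line.append(-1)
--         grid.append(line)
--     distance: int = n - 1
--     for i in range(n):
--         for j in range(distance, 2 * n - 1):
--             grid[i][j] = 0
--         distance -= 1
--     distance: int = 2 * n - 1
--     for i in range(n - 1, distance):
--         for j in range(0, distance):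
--             grid[i][j] = 0
--         distance -= 1
--     return grid
-- ===== SOURCE B (Python) =====
-- def create_grid(n: int = 7):
--     "fonction qui initialise une grille au format hexagonale"
--     grid = []
--     for i in range(2 * n - 1):
--         line = []
--         for j in range(2 * n - 1):
--             if (i <= n - 1 and j >= n - 1 - i) or (i >= n - 1 and j <= 3 * n - 3 - i):
--                 line.append(0)
--             else:
--                 line.append(-1)
--         grid.append(line)
--     return grid
-- ===== Notes on version B (the rewrite author's own statement) =====
-- stated objective: simpler
-- what changed: B builds the grid in one pass, deciding each cell with a closed-form hexagon predicate, instead of A's pre-fill followed by two triangular overwrite loops with a mutable distance counter.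
import Mathlib
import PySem

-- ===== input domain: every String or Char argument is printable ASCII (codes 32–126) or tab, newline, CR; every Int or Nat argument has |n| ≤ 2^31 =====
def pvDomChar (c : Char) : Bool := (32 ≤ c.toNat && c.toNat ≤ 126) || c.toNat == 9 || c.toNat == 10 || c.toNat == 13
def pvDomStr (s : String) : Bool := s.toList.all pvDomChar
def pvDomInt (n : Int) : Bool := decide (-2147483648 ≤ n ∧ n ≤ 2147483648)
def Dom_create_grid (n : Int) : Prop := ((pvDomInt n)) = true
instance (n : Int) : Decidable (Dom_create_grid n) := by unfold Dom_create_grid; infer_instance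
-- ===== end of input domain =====

-- B replaces A's pre-fill-then-overwrite triangular loops by a single pass that
-- decides each cell with a closed-form hexagon predicate (objective: simpler).

-- ===== PORT A =====
-- grid[i][j] = 0 is ported with the total pySetD/pyGetD forms; every executed index is in
-- range (the fill loops only run for 1 ≤ n, with 0 ≤ i, j < 2*n-1 = the built length),
-- so this is exact.
def create_grid (n : Int) : List (List Int) :=
  let grid : List (List Int) :=
    (PySem.List.pyRange 0 (2*n-1) 1).foldl (fun grid _i =>
      let line : List Int :=
        (PySem.List.pyRange 0 (2*n-1) 1).foldl (fun line _j => line ++ [(-1 : Int)]) []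
      grid ++ [line]) []
  let st1 : List (List Int) × Int :=
    (PySem.List.pyRange 0 n 1).foldl (fun st i =>
      ((PySem.List.pyRange st.2 (2*n-1) 1).foldl (fun g j =>
        PySem.List.pySetD g i (PySem.List.pySetD (PySem.List.pyGetD g i []) j 0)) st.1,
       st.2 - 1)) (grid, n - 1)
  let st2 : List (List Int) × Int :=
    (PySem.List.pyRange (n-1) (2*n-1) 1).foldl (fun st i =>
      ((PySem.List.pyRange 0 st.2 1).foldl (fun g j =>
        PySem.List.pySetD g i (PySem.List.pySetD (PySem.List.pyGetD g i []) j 0)) st.1,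
       st.2 - 1)) (st1.1, 2*n-1)
  st2.1

-- ===== PORT B =====
def create_grid_alt (n : Int) : List (List Int) :=
  (PySem.List.pyRange 0 (2*n-1) 1).foldl (fun grid i =>
    let line : List Int :=
      (PySem.List.pyRange 0 (2*n-1) 1).foldl (fun line j =>
        if (i ≤ n - 1 ∧ n - 1 - i ≤ j) ∨ (n - 1 ≤ i ∧ j ≤ 3*n - 3 - i) then
          line ++ [(0 : Int)]
        else
          line ++ [(-1 : Int)]) []
    grid ++ [line]) []

-- ===== PRECONDITION & SPEC =====
def Spec_create_grid (n : Int) (out : List (List Int)) : Prop := out = create_grid_alt n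
instance (n : Int) (out : List (List Int)) : Decidable (Spec_create_grid n out) := by unfold Spec_create_grid; infer_instance

-- ===== CLAIM (what is proved, stated in full; the proofs are below) =====
def Claim_equal_create_grid : Prop := ∀ (n : Int), Dom_create_grid n → Spec_create_grid n (create_grid n)

-- ===== LEMMAS AND PROOFS =====

-- A loop 'for i in range(a,b)' that also counts a distance down: the pair-state fold
-- projects to a fold where the distance is the closed form c - i.
theorem pv_pairloop {α : Type} (f : α → Int → Int → α) (b c : Int) :
    ∀ (t : Nat) (a : Int) (g : α) (d0 : Int), d0 = c - a → (b - a).toNat = t →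
    ((PySem.List.pyRange a b 1).foldl (fun st i => (f st.1 i st.2, st.2 - 1)) (g, d0)).1
      = (PySem.List.pyRange a b 1).foldl (fun g i => f g i (c - i)) g := by
  intro t
  induction t with
  | zero =>
    intro a g d0 hd ht
    rw [show PySem.List.pyRange a b 1 = [] from PySem.List.pyRange_one_eq_nil (by omega)]
    simp only [List.foldl_nil]
  | succ t ih =>
    intro a g d0 hd ht
    subst hd
    rw [show PySem.List.pyRange a b 1 = a :: PySem.List.pyRange (a+1) b 1 from
          PySem.List.pyRange_one_cons (by omega)]
    simp only [List.foldl_cons]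
    exact ih (a + 1) (f g a (c - a)) (c - a - 1) (by ring) (by omega)

-- The inner 'grid[i][j] = 0' loop reads and writes only row i: it is one row update.
theorem pv_rowset_eq (i : Int) (hi : 0 ≤ i) :
    ∀ (js : List Int) (g : List (List Int)), i.toNat < g.length →
    js.foldl (fun g j =>
        PySem.List.pySetD g i (PySem.List.pySetD (PySem.List.pyGetD g i []) j 0)) g
      = PySem.List.pySetD g i
          (js.foldl (fun r j => PySem.List.pySetD r j (0 : Int)) (PySem.List.pyGetD g i [])) := by
  intro js
  induction js with
  | nil =>
    intro g hlen
    simp only [List.foldl_nil]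
    rw [PySem.List.pySetD_of_nonneg _ _ hi,
        PySem.List.pyGetD_eq_getElem _ _ hi (by omega),
        List.set_getElem_self]
  | cons j js ih =>
    intro g hlen
    have hset : ∀ (x : List (List Int)) (v : List Int), PySem.List.pySetD x i v = x.set i.toNat v :=
      fun x v => PySem.List.pySetD_of_nonneg x v hi
    have hget : PySem.List.pyGetD (PySem.List.pySetD g i (PySem.List.pySetD (PySem.List.pyGetD g i []) j 0)) i []
        = PySem.List.pySetD (PySem.List.pyGetD g i []) j 0 := by
      rw [hset, PySem.List.pyGetD_eq_getElem _ _ hi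
            (by rw [List.length_set]; omega),
          List.getElem_set_self]
    simp only [List.foldl_cons]
    rw [ih _ (by rw [PySem.List.length_pySetD]; exact hlen), hget]
    simp only [hset]
    rw [List.set_set]

-- Setting position a of a range-comprehension list updates the function at a.
theorem pv_set_map_pyRange {α : Type} (m a : Int) (h : Int → α) (v : α)
    (ha : 0 ≤ a) (_ham : a < m) :
    ((PySem.List.pyRange 0 m 1).map h).set a.toNat v
      = (PySem.List.pyRange 0 m 1).map (fun i => if i = a then v else h i) := by
  apply List.ext_getElem
  · simp
  · intro k hk1 hk2
    simp only [List.length_set, List.length_map, PySem.List.length_pyRange_one] at hk1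
    simp only [List.getElem_set, List.getElem_map, PySem.List.getElem_pyRange_one]
    split_ifs <;> first | rfl | omega

-- A 'r[j] = 0 for j in range(a,b)' loop over a range-comprehension row, elementwise.
theorem pv_rowfold (m : Int) :
    ∀ (t : Nat) (a b : Int) (h : Int → Int), (b - a).toNat = t → 0 ≤ a →
    (PySem.List.pyRange a b 1).foldl (fun r j => PySem.List.pySetD r j (0 : Int))
        ((PySem.List.pyRange 0 m 1).map h)
      = (PySem.List.pyRange 0 m 1).map (fun j => if a ≤ j ∧ j < b then 0 else h j) := by
  intro t
  induction t with
  | zero =>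
    intro a b h ht ha
    rw [show PySem.List.pyRange a b 1 = [] from PySem.List.pyRange_one_eq_nil (by omega)]
    simp only [List.foldl_nil]
    apply List.map_congr_left
    intro x hx
    rw [PySem.List.mem_pyRange_one] at hx
    split_ifs <;> first | rfl | omega
  | succ t ih =>
    intro a b h ht ha
    rw [show PySem.List.pyRange a b 1 = a :: PySem.List.pyRange (a+1) b 1 from
          PySem.List.pyRange_one_cons (by omega)]
    simp only [List.foldl_cons]
    rw [PySem.List.pySetD_of_nonneg _ _ ha]
    by_cases ham : a < m
    · rw [pv_set_map_pyRange m a h 0 ha ham,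
          ih (a+1) b _ (by omega) (by omega)]
      apply List.map_congr_left
      intro x hx
      rw [PySem.List.mem_pyRange_one] at hx
      by_cases hxa : x = a
      · subst hxa
        split_ifs <;> first | rfl | omega
      · simp only [if_neg hxa]
        split_ifs <;> first | rfl | omega
    · rw [List.set_eq_of_length_le (by simp; omega),
          ih (a+1) b _ (by omega) (by omega)]
      apply List.map_congr_left
      intro x hx
      rw [PySem.List.mem_pyRange_one] at hx
      split_ifs <;> first | rfl | omega

-- The outer fill loop over rows of a range-comprehension grid, row by row.
theorem pv_setfold (m : Int) (jsf : Int → List Int) :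
    ∀ (t : Nat) (a b : Int) (h : Int → List Int), (b - a).toNat = t → 0 ≤ a → b ≤ m →
    (PySem.List.pyRange a b 1).foldl (fun g i =>
        (jsf i).foldl (fun g j =>
          PySem.List.pySetD g i (PySem.List.pySetD (PySem.List.pyGetD g i []) j 0)) g)
        ((PySem.List.pyRange 0 m 1).map h)
      = (PySem.List.pyRange 0 m 1).map (fun i =>
          if a ≤ i ∧ i < b then
            (jsf i).foldl (fun r j => PySem.List.pySetD r j (0 : Int)) (h i)
          else h i) := by
  intro t
  induction t with
  | zero =>
    intro a b h ht ha hb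
    rw [show PySem.List.pyRange a b 1 = [] from PySem.List.pyRange_one_eq_nil (by omega)]
    simp only [List.foldl_nil]
    apply List.map_congr_left
    intro x hx
    rw [PySem.List.mem_pyRange_one] at hx
    split_ifs <;> first | rfl | omega
  | succ t ih =>
    intro a b h ht ha hb
    rw [show PySem.List.pyRange a b 1 = a :: PySem.List.pyRange (a+1) b 1 from
          PySem.List.pyRange_one_cons (by omega)]
    simp only [List.foldl_cons]
    have hlen : a.toNat < ((PySem.List.pyRange 0 m 1).map h).length := by
      simp only [List.length_map, PySem.List.length_pyRange_one]; omega
    rw [pv_rowset_eq a ha (jsf a) _ hlen,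
        PySem.List.pySetD_of_nonneg _ _ ha,
        PySem.List.pyGetD_map_pyRange_of_nonneg h m a [] ha (by omega),
        pv_set_map_pyRange m a h _ ha (by omega),
        ih (a+1) b _ (by omega) (by omega) hb]
    apply List.map_congr_left
    intro x hx
    rw [PySem.List.mem_pyRange_one] at hx
    by_cases hxa : x = a
    · subst hxa
      split_ifs <;> first | rfl | omega
    · simp only [if_neg hxa]
      split_ifs <;> first | rfl | omega

-- ===== VERDICT (by name: the statement is the Claim_ definition above) =====
theorem create_grid_spec : Claim_equal_create_grid := by
  intro n _
  unfold Spec_create_grid create_grid create_grid_alt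
  dsimp only
  by_cases hn : n ≤ 0
  · rw [PySem.List.pyRange_one_eq_nil (show (2*n-1 : Int) ≤ 0 by omega),
        PySem.List.pyRange_one_eq_nil (show (n : Int) ≤ 0 by omega),
        PySem.List.pyRange_one_eq_nil (show (2*n-1 : Int) ≤ n - 1 by omega)]
    simp
  · -- 1 ≤ n
    simp only [PySem.List.foldl_append_singleton_eq_map, List.nil_append]
    -- B side: fuse the branch into one append, then turn the loops into maps
    have hB : ∀ i : Int,
        (PySem.List.pyRange 0 (2*n-1) 1).foldl (fun line j =>
          if (i ≤ n - 1 ∧ n - 1 - i ≤ j) ∨ (n - 1 ≤ i ∧ j ≤ 3*n - 3 - i) then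
            line ++ [(0 : Int)] else line ++ [(-1 : Int)]) []
        = (PySem.List.pyRange 0 (2*n-1) 1).map (fun j =>
            if (i ≤ n - 1 ∧ n - 1 - i ≤ j) ∨ (n - 1 ≤ i ∧ j ≤ 3*n - 3 - i) then (0:Int) else -1) := by
      intro i
      rw [PySem.List.foldl_congr_mem (PySem.List.pyRange 0 (2*n-1) 1)
            (fun line j =>
              if (i ≤ n - 1 ∧ n - 1 - i ≤ j) ∨ (n - 1 ≤ i ∧ j ≤ 3*n - 3 - i) then
                line ++ [(0 : Int)] else line ++ [(-1 : Int)])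
            (fun line j =>
              line ++ [if (i ≤ n - 1 ∧ n - 1 - i ≤ j) ∨ (n - 1 ≤ i ∧ j ≤ 3*n - 3 - i) then (0:Int) else -1])
            [] (by intro acc x _; dsimp only; split <;> rfl),
          PySem.List.foldl_append_singleton_eq_map, List.nil_append]
    simp only [hB]
    -- A side, loop 1: eliminate the distance state, then fill row by row
    have A1 : ((PySem.List.pyRange 0 n 1).foldl (fun st i =>
          ((PySem.List.pyRange st.2 (2*n-1) 1).foldl (fun g j =>
            PySem.List.pySetD g i (PySem.List.pySetD (PySem.List.pyGetD g i []) j 0)) st.1,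
           st.2 - 1))
          ((PySem.List.pyRange 0 (2*n-1) 1).map (fun _i =>
            (PySem.List.pyRange 0 (2*n-1) 1).map (fun _j => (-1 : Int))), n - 1)).1
        = (PySem.List.pyRange 0 (2*n-1) 1).map (fun i =>
            if 0 ≤ i ∧ i < n then
              (PySem.List.pyRange (n-1-i) (2*n-1) 1).foldl
                (fun r j => PySem.List.pySetD r j (0 : Int))
                ((PySem.List.pyRange 0 (2*n-1) 1).map (fun _j => (-1 : Int)))
            else (PySem.List.pyRange 0 (2*n-1) 1).map (fun _j => (-1 : Int))) :=
      Eq.trans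
        (pv_pairloop (fun g i d =>
            (PySem.List.pyRange d (2*n-1) 1).foldl (fun g j =>
              PySem.List.pySetD g i (PySem.List.pySetD (PySem.List.pyGetD g i []) j 0)) g)
          n (n-1) (n - 0).toNat 0 _ (n-1) (by ring) rfl)
        (pv_setfold (2*n-1) (fun i => PySem.List.pyRange (n-1-i) (2*n-1) 1)
          (n - 0).toNat 0 n (fun _i => (PySem.List.pyRange 0 (2*n-1) 1).map (fun _j => (-1 : Int)))
          rfl (by omega) (by omega))
    rw [A1]
    -- A side, loop 2
    have A2 : ((PySem.List.pyRange (n-1) (2*n-1) 1).foldl (fun st i =>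
          ((PySem.List.pyRange 0 st.2 1).foldl (fun g j =>
            PySem.List.pySetD g i (PySem.List.pySetD (PySem.List.pyGetD g i []) j 0)) st.1,
           st.2 - 1))
          ((PySem.List.pyRange 0 (2*n-1) 1).map (fun i =>
            if 0 ≤ i ∧ i < n then
              (PySem.List.pyRange (n-1-i) (2*n-1) 1).foldl
                (fun r j => PySem.List.pySetD r j (0 : Int))
                ((PySem.List.pyRange 0 (2*n-1) 1).map (fun _j => (-1 : Int)))
            else (PySem.List.pyRange 0 (2*n-1) 1).map (fun _j => (-1 : Int))), 2*n-1)).1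
        = (PySem.List.pyRange 0 (2*n-1) 1).map (fun i =>
            if n-1 ≤ i ∧ i < 2*n-1 then
              (PySem.List.pyRange 0 (3*n-2-i) 1).foldl
                (fun r j => PySem.List.pySetD r j (0 : Int))
                (if 0 ≤ i ∧ i < n then
                  (PySem.List.pyRange (n-1-i) (2*n-1) 1).foldl
                    (fun r j => PySem.List.pySetD r j (0 : Int))
                    ((PySem.List.pyRange 0 (2*n-1) 1).map (fun _j => (-1 : Int)))
                else (PySem.List.pyRange 0 (2*n-1) 1).map (fun _j => (-1 : Int)))
            else
              (if 0 ≤ i ∧ i < n then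
                (PySem.List.pyRange (n-1-i) (2*n-1) 1).foldl
                  (fun r j => PySem.List.pySetD r j (0 : Int))
                  ((PySem.List.pyRange 0 (2*n-1) 1).map (fun _j => (-1 : Int)))
              else (PySem.List.pyRange 0 (2*n-1) 1).map (fun _j => (-1 : Int)))) :=
      Eq.trans
        (pv_pairloop (fun g i d =>
            (PySem.List.pyRange 0 d 1).foldl (fun g j =>
              PySem.List.pySetD g i (PySem.List.pySetD (PySem.List.pyGetD g i []) j 0)) g)
          (2*n-1) (3*n-2) ((2*n-1) - (n-1)).toNat (n-1) _ (2*n-1) (by ring) rfl)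
        (pv_setfold (2*n-1) (fun i => PySem.List.pyRange 0 (3*n-2-i) 1)
          ((2*n-1) - (n-1)).toNat (n-1) (2*n-1)
          (fun i =>
            if 0 ≤ i ∧ i < n then
              (PySem.List.pyRange (n-1-i) (2*n-1) 1).foldl
                (fun r j => PySem.List.pySetD r j (0 : Int))
                ((PySem.List.pyRange 0 (2*n-1) 1).map (fun _j => (-1 : Int)))
            else (PySem.List.pyRange 0 (2*n-1) 1).map (fun _j => (-1 : Int)))
          rfl (by omega) (by omega))
    rw [A2]
    -- compare row by row, cell by cell
    apply List.map_congr_left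
    intro i hi
    rw [PySem.List.mem_pyRange_one] at hi
    by_cases h2 : n - 1 ≤ i ∧ i < 2*n-1
    · rw [if_pos h2]
      by_cases h1 : 0 ≤ i ∧ i < n
      · rw [if_pos h1,
            pv_rowfold (2*n-1) ((2*n-1) - (n-1-i)).toNat (n-1-i) (2*n-1) _ rfl (by omega),
            pv_rowfold (2*n-1) ((3*n-2-i) - 0).toNat 0 (3*n-2-i) _ rfl (by omega)]
        apply List.map_congr_left
        intro j hj
        rw [PySem.List.mem_pyRange_one] at hj
        split_ifs <;> first | rfl | omega
      · rw [if_neg h1,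
            pv_rowfold (2*n-1) ((3*n-2-i) - 0).toNat 0 (3*n-2-i) _ rfl (by omega)]
        apply List.map_congr_left
        intro j hj
        rw [PySem.List.mem_pyRange_one] at hj
        split_ifs <;> first | rfl | omega
    · rw [if_neg h2]
      by_cases h1 : 0 ≤ i ∧ i < n
      · rw [if_pos h1,
            pv_rowfold (2*n-1) ((2*n-1) - (n-1-i)).toNat (n-1-i) (2*n-1) _ rfl (by omega)]
        apply List.map_congr_left
        intro j hj
        rw [PySem.List.mem_pyRange_one] at hj
        split_ifs <;> first | rfl | omega
      · rw [if_neg h1]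
        apply List.map_congr_left
        intro j hj
        rw [PySem.List.mem_pyRange_one] at hj
        split_ifs <;> first | rfl | omega
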